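-- pv_equiv track=rewrite | github.com/mandarborkar/adventofcode | 2021/avent4b.py | foundwinner
-- ===== SOURCE A (Python) =====
-- def foundwinner(board):
--     for i in range ( 0, len ( board ) ):
--         totalrow = 0
--         totalcol = 0
--         # print (board);
--         if board[i][0] != -2 and board [0][i] != -2 :
--             for j in range ( 0, len ( board ) ):
--                 totalrow += int ( board[i][j] )
--                 totalcol += int ( board[j][i] )
--             if totalrow == -5:
--                 print ( "found winner row " + str ( i )  )
--                 return i
--             if totalcol == -5:
--                 print ( "found winner col " + str ( i )  )
--                 return i * -1
--     return -10
-- ===== SOURCE B (Python) =====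
-- def foundwinner(board):
--     n = len(board)
--     rowsums = [sum(int(x) for x in row[:n]) for row in board]
--     colsums = [sum(int(row[j]) for row in board) for j in range(n)]
--     for i in range(n):
--         if board[i][0] != -2 and board[0][i] != -2:
--             if rowsums[i] == -5:
--                 print("found winner row " + str(i))
--                 return i
--             if colsums[i] == -5:
--                 print("found winner col " + str(i))
--                 return i * -1
--     return -10
-- ===== Notes on version B (the rewrite author's own statement) =====
-- stated objective: alternative
-- what changed: B precomputes all row sums and column sums once via comprehensions (transposed access) and the main loop then only looks the sums up, instead of A's nested loop re-summing a row and a column at every index.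
-- outside the precondition, e.g. on foundwinner([[-2, -2], [-2]]): A returns -10, B raises IndexError
import Mathlib
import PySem

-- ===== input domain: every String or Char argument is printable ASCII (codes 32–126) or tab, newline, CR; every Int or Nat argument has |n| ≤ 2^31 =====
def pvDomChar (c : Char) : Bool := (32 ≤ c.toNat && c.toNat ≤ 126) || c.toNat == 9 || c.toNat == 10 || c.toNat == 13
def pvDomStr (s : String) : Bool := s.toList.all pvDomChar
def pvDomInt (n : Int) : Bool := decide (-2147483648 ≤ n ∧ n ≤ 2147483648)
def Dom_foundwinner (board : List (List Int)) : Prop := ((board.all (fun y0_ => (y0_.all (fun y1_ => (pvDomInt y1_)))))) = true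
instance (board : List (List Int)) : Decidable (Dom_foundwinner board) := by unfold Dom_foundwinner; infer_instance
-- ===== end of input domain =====

-- B replaces A's per-index nested re-summation by tables of row and column sums
-- precomputed once (column sums via transposed access); same O(n^2) cost (objective: alternative).
-- Pre_ excludes ragged boards (some row shorter than the board): there A either raises
-- IndexError or returns -10 only by luck of its guards, and B itself raises while
-- precomputing the column sums.


-- ===== PORT A =====
-- board[i][j] for nonnegative in-range indices (exact there; Pre_ keeps indices in range)
def fwCell (board : List (List Int)) (i j : Nat) : Int := (board.getD i []).getD j 0

-- the inner 'for j' loop accumulating totalrow and totalcol together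
def fwSums (board : List (List Int)) (i : Nat) : Int × Int :=
  (List.range board.length).foldl
    (fun (acc : Int × Int) j => (acc.1 + fwCell board i j, acc.2 + fwCell board j i)) (0, 0)

-- the outer 'for i' loop
def fwLoopA (board : List (List Int)) : List Nat → Int
  | [] => -10
  | i :: rest =>
    if fwCell board i 0 ≠ -2 ∧ fwCell board 0 i ≠ -2 then
      let s := fwSums board i
      if s.1 = -5 then (i : Int)
      else if s.2 = -5 then (i : Int) * (-1)
      else fwLoopA board rest
    else fwLoopA board rest

def foundwinner (board : List (List Int)) : Int :=
  fwLoopA board (List.range board.length)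

-- ===== PORT B =====
-- rowsums = [sum(int(x) for x in row[:n]) for row in board]
def fwRowSums (board : List (List Int)) : List Int :=
  board.map (fun row => (row.take board.length).foldl (· + ·) 0)

-- colsums = [sum(int(row[j]) for row in board) for j in range(n)]
def fwColSums (board : List (List Int)) : List Int :=
  (List.range board.length).map (fun j => board.foldl (fun a row => a + row.getD j 0) 0)

-- the lookup loop 'for i in range(n)'
def fwLoopB (board : List (List Int)) (rowsums colsums : List Int) : List Nat → Int
  | [] => -10
  | i :: rest =>
    if fwCell board i 0 ≠ -2 ∧ fwCell board 0 i ≠ -2 then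
      if rowsums.getD i 0 = -5 then (i : Int)
      else if colsums.getD i 0 = -5 then (i : Int) * (-1)
      else fwLoopB board rowsums colsums rest
    else fwLoopB board rowsums colsums rest

def foundwinner_alt (board : List (List Int)) : Int :=
  fwLoopB board (fwRowSums board) (fwColSums board) (List.range board.length)

-- ===== PRECONDITION & SPEC =====
-- Pre_ excludes ragged boards (a row shorter than len(board)): there A's indexing may
-- raise IndexError (and where A happens to return -10, B's precomputation raises).
def Pre_foundwinner (board : List (List Int)) : Prop :=
  ∀ row ∈ board, board.length ≤ row.length
instance (board : List (List Int)) : Decidable (Pre_foundwinner board) := by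
  unfold Pre_foundwinner; infer_instance

def pvWitness_foundwinner : List (List Int) := [[1, 2], [-2, -3]]

def Spec_foundwinner (board : List (List Int)) (out : Int) : Prop := out = foundwinner_alt board
instance (board : List (List Int)) (out : Int) : Decidable (Spec_foundwinner board out) := by unfold Spec_foundwinner; infer_instance

-- ===== CLAIM (what is proved, stated in full; the proofs are below) =====
def Claim_equal_foundwinner : Prop := ∀ (board : List (List Int)), Dom_foundwinner board → Pre_foundwinner board → Spec_foundwinner board (foundwinner board)

-- ===== LEMMAS AND PROOFS =====

-- a fold over a pair with independent components splits into two folds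
theorem pvFoldlPair {α : Type} (f g : Int → α → Int) (l : List α) (a b : Int) :
    l.foldl (fun (p : Int × Int) x => (f p.1 x, g p.2 x)) (a, b) = (l.foldl f a, l.foldl g b) := by
  induction l generalizing a b with
  | nil => rfl
  | cons x xs ih => simp only [List.foldl_cons]; exact ih _ _

-- A's simultaneous row/col fold, split into its two components
theorem fwSums_eq (board : List (List Int)) (i : Nat) :
    fwSums board i =
      ((List.range board.length).foldl (fun a j => a + fwCell board i j) 0,
       (List.range board.length).foldl (fun a j => a + fwCell board j i) 0) := by
  unfold fwSums
  exact pvFoldlPair (fun a j => a + fwCell board i j) (fun a j => a + fwCell board j i) _ 0 0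

-- reading off the first n entries by index reproduces take n
theorem pvMapRangeGetD {α : Type} (l : List α) (d : α) (n : Nat) (h : n ≤ l.length) :
    (List.range n).map (fun j => l.getD j d) = l.take n := by
  apply List.ext_getElem
  · simp [Nat.min_eq_left h]
  · intro k h1 h2
    have hk : k < n := by simpa using h1
    have hkl : k < l.length := lt_of_lt_of_le hk h
    simp [List.getD_eq_getElem?_getD, List.getElem?_eq_getElem hkl]

theorem pvRowSum_eq (board : List (List Int)) (hpre : Pre_foundwinner board)
    (i : Nat) (hi : i < board.length) :
    (fwRowSums board).getD i 0 =
      (List.range board.length).foldl (fun a j => a + fwCell board i j) 0 := by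
  have hmem : board[i] ∈ board := List.getElem_mem hi
  have hlen : board.length ≤ board[i].length := hpre _ hmem
  have h1 : (fwRowSums board).getD i 0 = (board[i].take board.length).foldl (· + ·) 0 := by
    unfold fwRowSums
    have : i < (board.map (fun row => (row.take board.length).foldl (· + ·) 0)).length := by
      simpa using hi
    simp [List.getD_eq_getElem?_getD, List.getElem?_eq_getElem this]
  rw [h1, ← pvMapRangeGetD board[i] 0 board.length hlen, List.foldl_map]
  have hcell : ∀ j, fwCell board i j = board[i].getD j 0 := by
    intro j
    unfold fwCell
    simp [List.getD_eq_getElem?_getD, List.getElem?_eq_getElem hi]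
  simp only [hcell]

theorem pvColSum_eq (board : List (List Int)) (i : Nat) (hi : i < board.length) :
    (fwColSums board).getD i 0 =
      (List.range board.length).foldl (fun a j => a + fwCell board j i) 0 := by
  have h1 : (fwColSums board).getD i 0 = board.foldl (fun a row => a + row.getD i 0) 0 := by
    unfold fwColSums
    have hlen : i < ((List.range board.length).map
        (fun j => board.foldl (fun a row => a + row.getD j 0) 0)).length := by simpa using hi
    simp [List.getD_eq_getElem?_getD, hi]
  rw [h1]
  have h2 : (List.range board.length).map (fun j => board.getD j []) = board := by
    simpa using pvMapRangeGetD board [] board.length le_rfl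
  conv_lhs => rw [← h2]
  rw [List.foldl_map]
  rfl

theorem pvLoop_eq (board : List (List Int)) (hpre : Pre_foundwinner board) :
    ∀ is : List Nat, (∀ i ∈ is, i < board.length) →
      fwLoopA board is = fwLoopB board (fwRowSums board) (fwColSums board) is := by
  intro is
  induction is with
  | nil => intro _; rfl
  | cons i rest ih =>
    intro hall
    have hi : i < board.length := hall i (List.mem_cons_self ..)
    have hrest := ih (fun j hj => hall j (List.mem_cons_of_mem _ hj))
    unfold fwLoopA fwLoopB
    rw [fwSums_eq]
    simp only [pvRowSum_eq board hpre i hi, pvColSum_eq board i hi, hrest]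

-- ===== VERDICT (by name: the statement is the Claim_ definition above) =====
theorem foundwinner_spec : Claim_equal_foundwinner := by
  intro board _ hpre
  unfold Spec_foundwinner foundwinner foundwinner_alt
  exact pvLoop_eq board hpre (List.range board.length) (by intro i hi; simpa using hi)
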